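-- pv_equiv track=rewrite | github.com/alexandra-krzan/Crime-Project---Python | Python Crime Project.py | count_crimes_by_beat
-- ===== SOURCE A (Python) =====
-- def count_crimes_by_beat(data):
--     beat_counts = {}
--     for row in data:
--         beat = row['beat'].strip()
--         if beat not in beat_counts:
--             beat_counts[beat] = 0
--         beat_counts[beat] += 1
--     return beat_counts
-- ===== SOURCE B (Python) =====
-- def count_crimes_by_beat(data):
--     # Repeated-partition counting: peel off the first remaining beat, count its
--     # whole run with one count(), drop all its occurrences, repeat.
--     beats = [row['beat'].strip() for row in data]
--     result = {}
--     while beats: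
--         b = beats[0]
--         result[b] = beats.count(b)
--         beats = [x for x in beats if x != b]
--     return result
-- ===== Notes on version B (the rewrite author's own statement) =====
-- stated objective: alternative
-- what changed: Replaces the single-pass dict-counting loop by a repeated-partition scheme: materialise the stripped beats, then repeatedly take the first remaining beat, count all its occurrences at once, and filter them out, so no per-row counter is ever maintained.
import Mathlib
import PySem

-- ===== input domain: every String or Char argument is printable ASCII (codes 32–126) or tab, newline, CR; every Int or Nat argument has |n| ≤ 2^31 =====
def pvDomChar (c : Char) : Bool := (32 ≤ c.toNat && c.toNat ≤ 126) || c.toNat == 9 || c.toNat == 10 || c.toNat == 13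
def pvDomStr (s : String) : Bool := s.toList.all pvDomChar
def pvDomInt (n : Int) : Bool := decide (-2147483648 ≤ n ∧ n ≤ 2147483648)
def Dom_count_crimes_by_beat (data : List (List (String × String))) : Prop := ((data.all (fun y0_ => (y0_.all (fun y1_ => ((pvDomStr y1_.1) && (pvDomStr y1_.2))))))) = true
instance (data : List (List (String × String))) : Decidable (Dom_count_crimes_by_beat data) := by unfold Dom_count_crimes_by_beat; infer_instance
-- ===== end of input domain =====

-- B replaces A's single-pass incremental dict counting by repeated partition (peel off
-- the first remaining beat, count its occurrences at once, filter them out); same result, not faster.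

-- ===== PORT A =====
def count_crimes_by_beat (data : List (List (String × String))) : List (String × Int) :=
  (data.foldl (fun (bc : PySem.Dict String Int) row =>
      let beat := PySem.Str.strip (((PySem.Dict.mk row).get? "beat").getD "")
      let bc := if bc.contains beat then bc else bc.insert beat 0
      bc.insert beat (bc.getD beat 0 + 1))
    PySem.Dict.empty).items

-- ===== PORT B =====
-- the 'while beats:' loop of Source B: each round records (b, beats.count(b)) and filters b out
def altGo : List String → List (String × Int)
  | [] => []
  | b :: t =>
      (b, ((b :: t).count b : Int)) :: altGo (t.filter (fun x => !(x == b)))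
termination_by bs => bs.length
decreasing_by
  have h := List.length_filter_le (fun x : {x // x ∈ t} => !((x : String) == b)) t.attach
  simp only [List.length_attach] at h
  simpa using Nat.lt_succ_of_le (le_trans (by simp) h)

def count_crimes_by_beat_alt (data : List (List (String × String))) : List (String × Int) :=
  let beats := data.map (fun row => PySem.Str.strip (((PySem.Dict.mk row).get? "beat").getD ""))
  altGo beats

-- ===== PRECONDITION & SPEC =====
-- Pre_ excludes exactly the rows without a 'beat' key, where Python A raises KeyError.
def Pre_count_crimes_by_beat (data : List (List (String × String))) : Prop :=
  ∀ row ∈ data, "beat" ∈ row.map Prod.fst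
instance (data : List (List (String × String))) : Decidable (Pre_count_crimes_by_beat data) := by unfold Pre_count_crimes_by_beat; infer_instance
def pvWitness_count_crimes_by_beat : (List (List (String × String))) :=
  [[("beat", " 21 ")], [("beat", "21"), ("district", "N")], [("beat", "7")]]

def Spec_count_crimes_by_beat (data : List (List (String × String))) (out : List (String × Int)) : Prop := out = count_crimes_by_beat_alt data
instance (data : List (List (String × String))) (out : List (String × Int)) : Decidable (Spec_count_crimes_by_beat data out) := by unfold Spec_count_crimes_by_beat; infer_instance

-- ===== CLAIM (what is proved, stated in full; the proofs are below) =====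
def Claim_equal_count_crimes_by_beat : Prop := ∀ (data : List (List (String × String))), Dom_count_crimes_by_beat data → Pre_count_crimes_by_beat data → Spec_count_crimes_by_beat data (count_crimes_by_beat data)

-- ===== LEMMAS AND PROOFS =====

-- A's loop body (conditional zero-initialisation then increment) is one overwrite.
lemma stepA_eq (d : PySem.Dict String Int) (b : String) :
    (let d' := if d.contains b then d else d.insert b 0
     d'.insert b (d'.getD b 0 + 1)) = d.insert b (d.getD b 0 + 1) := by
  by_cases h : d.contains b = true
  · simp [h]
  · have hc : d.contains b = false := by simpa using h
    simp only [hc, Bool.false_eq_true, if_false, PySem.Dict.getD_insert_self,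
      PySem.Dict.insert_insert_self, PySem.Dict.getD_of_not_contains d 0 hc]

-- dedup commutes with filtering
lemma ofList_filter (p : String → Bool) :
    ∀ (l : List String), PySem.Set.ofList (l.filter p) = (PySem.Set.ofList l).filter p := by
  intro l
  induction l with
  | nil => rfl
  | cons x t ih =>
      by_cases hp : p x = true
      · rw [List.filter_cons_of_pos hp, PySem.Set.ofList_cons, PySem.Set.ofList_cons,
            List.filter_cons_of_pos hp, ih]
        simp [PySem.Set.discard, List.filter_filter, Bool.and_comm]
      · rw [List.filter_cons_of_neg (by simpa using hp), PySem.Set.ofList_cons, ih,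
            List.filter_cons_of_neg (by simpa using hp)]
        simp only [PySem.Set.discard, List.filter_filter]
        apply List.filter_congr
        intro y hy
        by_cases hyx : y = x
        · subst hyx; simp_all
        · simp [hyx]

-- B's partition recursion computes, in first-occurrence order, each beat with its total count.
lemma altGo_aux : ∀ (n : Nat) (bs : List String), bs.length ≤ n →
    altGo bs = (PySem.Set.ofList bs).map (fun k => (k, (bs.count k : Int))) := by
  intro n
  induction n with
  | zero =>
      intro bs h
      have : bs = [] := List.eq_nil_of_length_eq_zero (Nat.le_zero.mp h)
      subst this
      rw [altGo]
      rfl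
  | succ n ih =>
      intro bs h
      match bs with
      | [] => rw [altGo]; rfl
      | b :: t =>
        rw [altGo, ih _ (le_trans (List.length_filter_le _ _) (by simpa using Nat.succ_le_succ_iff.mp h)),
            PySem.Set.ofList_cons, List.map_cons]
        congr 1
        rw [ofList_filter]
        simp only [PySem.Set.discard]
        apply List.map_congr_left
        intro k hk
        have hkb : (k == b) = false := by
          rcases List.mem_filter.mp hk with ⟨_, h2⟩
          simpa using h2
        have hkb' : ¬ (k = b) := by simpa using hkb
        congr 1
        rw [List.count_cons_of_ne (Ne.symm hkb'), List.count_filter (by simpa using hkb)]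

lemma altGo_eq_map_count (bs : List String) :
    altGo bs = (PySem.Set.ofList bs).map (fun k => (k, (bs.count k : Int))) :=
  altGo_aux bs.length bs le_rfl

-- A's whole fold, over the common list of stripped beats, yields Counter items.
lemma beats_fold_eq (bs : List String) :
    (bs.foldl (fun (bc : PySem.Dict String Int) beat =>
        let bc := if bc.contains beat then bc else bc.insert beat 0
        bc.insert beat (bc.getD beat 0 + 1)) PySem.Dict.empty).items
      = (PySem.Set.ofList bs).map (fun k => (k, (bs.count k : Int))) := by
  have h := PySem.List.foldl_congr_mem (l := bs) (init := (PySem.Dict.empty : PySem.Dict String Int))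
    (f := fun (bc : PySem.Dict String Int) beat =>
        let bc := if bc.contains beat then bc else bc.insert beat 0
        bc.insert beat (bc.getD beat 0 + 1))
    (g := fun (d : PySem.Dict String Int) b => d.insert b (d.getD b 0 + 1))
    (fun acc x _ => stepA_eq acc x)
  rw [h, PySem.Dict.foldl_insert_getD_add_one_eq_counter, PySem.Dict.items_counter]

-- ===== VERDICT (by name: the statement is the Claim_ definition above) =====
theorem count_crimes_by_beat_spec : Claim_equal_count_crimes_by_beat := by
  intro data _ _
  unfold Spec_count_crimes_by_beat count_crimes_by_beat count_crimes_by_beat_alt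
  rw [← List.foldl_map (f := fun row => PySem.Str.strip (((PySem.Dict.mk row).get? "beat").getD ""))
        (g := fun (bc : PySem.Dict String Int) beat =>
          let bc := if bc.contains beat then bc else bc.insert beat 0
          bc.insert beat (bc.getD beat 0 + 1))]
  rw [altGo_eq_map_count, beats_fold_eq]
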